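-- pv_equiv track=rewrite | github.com/OTOYO1020/ChatDev_Intermediate | WareHouse/128_D_DefaultOrganization_20250426220348/simulation.py | simulate_operations
-- ===== SOURCE A (Python) =====
-- def simulate_operations(V, N, K):
--     max_sum = 0
--     # Iterate over possible numbers of operations A (a) and B (b)
--     for a in range(min(N, K) + 1):
--         for b in range(min(N, K - a) + 1):
--             if a + b <= K:
--                 # Collect jewels based on the values of a and b
--                 left_jewels = V[:a] if a > 0 else []  # Ensure a > 0 before slicing
--                 right_jewels = V[-b:] if b > 0 else []  # Ensure b > 0 before slicing
--                 hand = left_jewels + right_jewels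
--                 remaining_operations = K - (a + b)
--                 # Calculate the current sum of jewels after optimization
--                 current_sum = optimize_jewels(hand, remaining_operations)
--                 max_sum = max(max_sum, current_sum)
--     return max_sum
--
-- def optimize_jewels(hand, remaining_operations):
--     if not hand:  # Check if hand is empty
--         return 0
--     hand.sort()
--     # Ensure we do not discard more jewels than we have
--     discard_count = min(remaining_operations, len(hand))
--     hand = hand[discard_count:]  # Discard the lowest values
--     return sum(hand)
-- ===== SOURCE B (Python) =====
-- def _insert_sorted(hand, x):
--     # splice x into an ascending list, after equal elements
--     i = 0
--     while i < len(hand) and hand[i] <= x: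
--         i += 1
--     return hand[:i] + [x] + hand[i:]
--
-- def simulate_operations(V, N, K):
--     best = 0
--     n = len(V)
--     for a in range(min(N, K) + 1):
--         # incrementally maintained ascending hand for the fixed prefix V[:a]
--         hand = sorted(V[:a])
--         total = sum(hand)
--         for b in range(min(N, K - a) + 1):
--             if 0 < b <= n:
--                 x = V[n - b]
--                 hand = _insert_sorted(hand, x)
--                 total += x
--             d = K - a - b
--             best = max(best, total - sum(hand[:d]))
--     return best
-- ===== Notes on version B (the rewrite author's own statement) =====
-- stated objective: alternative
-- what changed: Instead of rebuilding and fully sorting the hand for every (a,b) pair, B sorts the prefix once per a and then maintains the ascending hand and its running total incrementally with one ordered insertion per b, reading each pair's value as total minus the sum of the d smallest.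
import Mathlib
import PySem

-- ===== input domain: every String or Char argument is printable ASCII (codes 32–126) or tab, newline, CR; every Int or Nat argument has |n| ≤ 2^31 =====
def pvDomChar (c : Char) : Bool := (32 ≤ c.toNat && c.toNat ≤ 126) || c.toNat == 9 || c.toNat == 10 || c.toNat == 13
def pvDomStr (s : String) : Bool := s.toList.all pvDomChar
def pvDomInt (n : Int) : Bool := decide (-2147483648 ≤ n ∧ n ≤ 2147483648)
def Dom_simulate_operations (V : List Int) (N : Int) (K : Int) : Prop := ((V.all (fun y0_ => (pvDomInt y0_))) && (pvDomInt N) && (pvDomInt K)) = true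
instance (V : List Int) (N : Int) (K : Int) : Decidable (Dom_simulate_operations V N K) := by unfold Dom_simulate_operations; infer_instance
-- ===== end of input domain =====

-- B replaces the per-pair rebuild-and-sort of the hand by one sort per prefix plus an
-- incrementally maintained sorted hand and running total (objective: alternative).


-- ===== PORT A =====
def optimize_jewels (hand : List Int) (remaining_operations : Int) : Int :=
  if hand = [] then 0
  else
    let h := PySem.List.sorted hand (fun x => x) false
    let discard_count : Int := min remaining_operations (h.length : Int)
    (PySem.List.slice h (some discard_count) none).sum

def simulate_operations (V : List Int) (N : Int) (K : Int) : Int :=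
  (PySem.List.pyRange 0 (min N K + 1) 1).foldl (fun max_sum a =>
    (PySem.List.pyRange 0 (min N (K - a) + 1) 1).foldl (fun max_sum b =>
      if a + b ≤ K then
        let left_jewels := if a > 0 then PySem.List.slice V none (some a) else []
        let right_jewels := if b > 0 then PySem.List.slice V (some (-b)) none else []
        let hand := left_jewels ++ right_jewels
        let remaining_operations := K - (a + b)
        let current_sum := optimize_jewels hand remaining_operations
        max max_sum current_sum
      else max_sum) max_sum) 0

-- ===== PORT B =====
-- splice x into an ascending list, after equal elements (the while-loop of _insert_sorted)
def insert_sorted (hand : List Int) (x : Int) : List Int :=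
  match hand with
  | [] => [x]
  | y :: t => if y ≤ x then y :: insert_sorted t x else x :: y :: t

def simulate_operations_alt (V : List Int) (N : Int) (K : Int) : Int :=
  let n : Int := V.length
  (PySem.List.pyRange 0 (min N K + 1) 1).foldl (fun best a =>
    let hand0 := PySem.List.sorted (PySem.List.slice V none (some a)) (fun x => x) false
    ((PySem.List.pyRange 0 (min N (K - a) + 1) 1).foldl (fun st b =>
      let st1 := if 0 < b ∧ b ≤ n then
          -- V[n-b]: the index is always in range here
          let x := PySem.List.pyGetD V (n - b) 0
          (insert_sorted st.1 x, st.2.1 + x)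
        else (st.1, st.2.1)
      let d := K - a - b
      (st1.1, st1.2, max st.2.2 (st1.2 - (PySem.List.slice st1.1 none (some d)).sum)))
      (hand0, hand0.sum, best)).2.2) 0

-- ===== PRECONDITION & SPEC =====
def Spec_simulate_operations (V : List Int) (N : Int) (K : Int) (out : Int) : Prop := out = simulate_operations_alt V N K
instance (V : List Int) (N : Int) (K : Int) (out : Int) : Decidable (Spec_simulate_operations V N K out) := by unfold Spec_simulate_operations; infer_instance

-- ===== CLAIM (what is proved, stated in full; the proofs are below) =====
def Claim_equal_simulate_operations : Prop := ∀ (V : List Int) (N : Int) (K : Int), Dom_simulate_operations V N K → Spec_simulate_operations V N K (simulate_operations V N K)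

-- ===== LEMMAS AND PROOFS =====

-- membership/order facts about B's ordered insertion
theorem pv_insert_perm (x : Int) : ∀ (h : List Int), (insert_sorted h x).Perm (x :: h)
  | [] => by simp [insert_sorted]
  | y :: t => by
      simp only [insert_sorted]
      split_ifs with hy
      · exact ((pv_insert_perm x t).cons y).trans (List.Perm.swap x y t)
      · exact List.Perm.refl _

theorem pv_insert_pairwise (x : Int) : ∀ (h : List Int), h.Pairwise (· ≤ ·) →
    (insert_sorted h x).Pairwise (· ≤ ·)
  | [], _ => by simp [insert_sorted]
  | y :: t, hp => by
      simp only [insert_sorted]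
      rcases List.pairwise_cons.mp hp with ⟨hy, ht⟩
      split_ifs with hle
      · refine List.pairwise_cons.mpr ⟨?_, pv_insert_pairwise x t ht⟩
        intro z hz
        rcases List.mem_cons.mp ((pv_insert_perm x t).mem_iff.mp hz) with rfl | hzt
        · exact hle
        · exact hy z hzt
      · refine List.pairwise_cons.mpr ⟨?_, hp⟩
        intro z hz
        rcases List.mem_cons.mp hz with rfl | hzt
        · omega
        · exact le_trans (by omega) (hy z hzt)

-- A's per-pair value, computed from ANY ascending rearrangement `hand` of the hand `H`
theorem pv_val_eq (H hand : List Int) (d : Int) (hd : 0 ≤ d)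
    (hp : hand.Perm H) (hs : hand.Pairwise (· ≤ ·)) :
    optimize_jewels H d = H.sum - (PySem.List.slice hand none (some d)).sum := by
  rw [PySem.List.slice_to hand hd]
  by_cases hH : H = []
  · subst hH
    have h0 : hand = [] := (List.Perm.nil_eq hp.symm).symm
    simp [optimize_jewels, h0]
  · have hsort : PySem.List.sorted H (fun x => x) false = hand :=
      PySem.List.sorted_id_eq_of_perm_of_pairwise H hand hp hs
    have hsum : hand.sum = H.sum := hp.sum_eq
    simp only [optimize_jewels, if_neg hH, hsort]
    have hlen0 : (0:Int) ≤ (hand.length : Int) := by positivity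
    have h0 : (0:Int) ≤ min d (hand.length : Int) := le_min hd hlen0
    rw [PySem.List.slice_from _ h0]
    have hmin : (min d (hand.length : Int)).toNat = min d.toNat hand.length := by omega
    rw [hmin]
    have hdrop : hand.drop (min d.toNat hand.length) = hand.drop d.toNat := by
      rcases le_total d.toNat hand.length with h | h
      · rw [Nat.min_eq_left h]
      · rw [Nat.min_eq_right h, List.drop_eq_nil_of_le (le_refl _),
            List.drop_eq_nil_of_le h]
    rw [hdrop]
    have := List.sum_take_add_sum_drop hand d.toNat
    omega

-- A's hand expression, in drop/take form
theorem pv_handA (V : List Int) (a b : Int) (ha : 0 ≤ a) (hb : 0 ≤ b) :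
    ((if a > 0 then PySem.List.slice V none (some a) else []) ++
      (if b > 0 then PySem.List.slice V (some (-b)) none else []))
    = V.take a.toNat ++ V.drop (V.length - b.toNat) := by
  congr 1
  · by_cases h : a > 0
    · rw [if_pos h, PySem.List.slice_to V ha]
    · have h0 : a = 0 := by omega
      subst h0; simp
  · by_cases h : b > 0
    · rw [if_pos h]
      have hk : 0 < b.toNat := by omega
      have hcast : -b = -((b.toNat : Nat) : Int) := by omega
      rw [hcast, PySem.List.slice_from_neg_natCast V b.toNat hk]
    · have h0 : b = 0 := by omega
      subst h0; simp

-- one step deeper into the suffix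
theorem pv_drop_step (V : List Int) (b : Int) (h1 : 0 < b) (h2 : b ≤ (V.length : Int)) :
    V.drop (V.length - b.toNat) =
      PySem.List.pyGetD V ((V.length : Int) - b) 0 :: V.drop (V.length - (b - 1).toNat) := by
  have hk : V.length - b.toNat < V.length := by omega
  have hg : PySem.List.pyGetD V ((V.length : Int) - b) 0 = V[V.length - b.toNat] := by
    have h0 : (0:Int) ≤ (V.length : Int) - b := by omega
    rw [PySem.List.pyGetD_of_nonneg V 0 h0]
    rw [List.getD_eq_getElem _ _ (by omega)]
    congr 1
    omega
  rw [hg, List.drop_eq_getElem_cons hk]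
  congr 2
  omega

-- the inner b-loops agree, given B's invariant on (hand, total)
theorem pv_inner (V : List Int) (K a : Int) (ha : 0 ≤ a) :
    ∀ (cnt : Nat) (b0 : Int) (hand : List Int) (total best : Int),
      0 ≤ b0 → b0 + (cnt : Int) ≤ K - a + 1 →
      hand.Perm (V.take a.toNat ++ V.drop (V.length - (b0 - 1).toNat)) →
      hand.Pairwise (· ≤ ·) → total = hand.sum →
      ((PySem.List.pyRange b0 (b0 + (cnt : Int)) 1).foldl (fun st b =>
          let st1 := if 0 < b ∧ b ≤ (V.length : Int) then
              let x := PySem.List.pyGetD V ((V.length : Int) - b) 0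
              (insert_sorted st.1 x, st.2.1 + x)
            else (st.1, st.2.1)
          let d := K - a - b
          (st1.1, st1.2, max st.2.2 (st1.2 - (PySem.List.slice st1.1 none (some d)).sum)))
        (hand, total, best)).2.2
      = (PySem.List.pyRange b0 (b0 + (cnt : Int)) 1).foldl (fun max_sum b =>
          if a + b ≤ K then
            let left_jewels := if a > 0 then PySem.List.slice V none (some a) else []
            let right_jewels := if b > 0 then PySem.List.slice V (some (-b)) none else []
            let hand := left_jewels ++ right_jewels
            let remaining_operations := K - (a + b)
            let current_sum := optimize_jewels hand remaining_operations
            max max_sum current_sum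
          else max_sum) best := by
  intro cnt
  induction cnt with
  | zero =>
      intro b0 hand total best _ _ _ _ _
      rw [show b0 + ((0:Nat) : Int) = b0 by push_cast; ring]
      rw [PySem.List.pyRange_one_eq_nil (le_refl b0)]
      rfl
  | succ m ih =>
      intro b0 hand total best hb0 hbnd hperm hpw htot
      have hm1 : ((m+1 : Nat) : Int) = (m : Int) + 1 := by push_cast; ring
      have hlt : b0 < b0 + ((m+1 : Nat) : Int) := by omega
      rw [PySem.List.pyRange_one_cons hlt]
      simp only [List.foldl_cons]
      have hble : b0 ≤ K - a := by omega
      have hite : a + b0 ≤ K := by omega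
      have hshift : b0 + ((m+1 : Nat) : Int) = (b0 + 1) + ((m : Nat) : Int) := by omega
      by_cases hcase : 0 < b0 ∧ b0 ≤ (V.length : Int)
      · -- an element joins the suffix
        have hstep := pv_drop_step V b0 hcase.1 hcase.2
        set x := PySem.List.pyGetD V ((V.length : Int) - b0) 0 with hx
        have hperm' : (insert_sorted hand x).Perm
            (V.take a.toNat ++ V.drop (V.length - b0.toNat)) := by
          rw [hstep]
          exact ((pv_insert_perm x hand).trans (hperm.cons x)).trans List.perm_middle.symm
        have hpw' := pv_insert_pairwise x hand hpw
        have hsum' : total + x = (insert_sorted hand x).sum := by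
          rw [(pv_insert_perm x hand).sum_eq, List.sum_cons]; omega
        have hAval : optimize_jewels
              ((if a > 0 then PySem.List.slice V none (some a) else []) ++
               (if b0 > 0 then PySem.List.slice V (some (-b0)) none else []))
              (K - (a + b0))
            = (total + x) -
              (PySem.List.slice (insert_sorted hand x) none (some (K - a - b0))).sum := by
          rw [pv_handA V a b0 ha (by omega), show K - (a + b0) = K - a - b0 by ring]
          rw [pv_val_eq (V.take a.toNat ++ V.drop (V.length - b0.toNat))
                (insert_sorted hand x) (K - a - b0) (by omega) hperm' hpw']
          rw [hperm'.sum_eq.symm, ← hsum']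
        simp only [if_pos hcase, if_pos hite, hAval]
        rw [hshift]
        exact ih (b0 + 1) (insert_sorted hand x) (total + x)
          (max best ((total + x) -
            (PySem.List.slice (insert_sorted hand x) none (some (K - a - b0))).sum))
          (by omega) (by omega)
          (by rw [show b0 + 1 - 1 = b0 by ring]; exact hperm') hpw' hsum'
      · -- b0 = 0 or the suffix is already all of V: the hand is unchanged
        have hdropeq : V.drop (V.length - (b0 - 1).toNat) = V.drop (V.length - b0.toNat) := by
          congr 1
          omega
        rw [hdropeq] at hperm
        have hAval : optimize_jewels
              ((if a > 0 then PySem.List.slice V none (some a) else []) ++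
               (if b0 > 0 then PySem.List.slice V (some (-b0)) none else []))
              (K - (a + b0))
            = total - (PySem.List.slice hand none (some (K - a - b0))).sum := by
          rw [pv_handA V a b0 ha (by omega), show K - (a + b0) = K - a - b0 by ring]
          rw [pv_val_eq (V.take a.toNat ++ V.drop (V.length - b0.toNat))
                hand (K - a - b0) (by omega) hperm hpw]
          rw [hperm.sum_eq.symm, htot]
        simp only [if_neg hcase, if_pos hite, hAval]
        rw [hshift]
        exact ih (b0 + 1) hand total
          (max best (total - (PySem.List.slice hand none (some (K - a - b0))).sum))
          (by omega) (by omega)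
          (by rw [show b0 + 1 - 1 = b0 by ring]; exact hperm) hpw htot


-- ===== VERDICT (by name: the statement is the Claim_ definition above) =====
theorem simulate_operations_spec : Claim_equal_simulate_operations := by
  unfold Claim_equal_simulate_operations
  intro V N K _
  unfold Spec_simulate_operations
  show simulate_operations V N K = simulate_operations_alt V N K
  apply PySem.List.foldl_congr_mem
  intro best a hmem
  obtain ⟨ha0, haub⟩ := PySem.List.mem_pyRange_one.mp hmem
  by_cases hM : 0 ≤ min N (K - a) + 1
  · have hrw : min N (K - a) + 1 = 0 + (((min N (K - a) + 1).toNat : Nat) : Int) := by omega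
    rw [hrw]
    refine (pv_inner V K a ha0 (min N (K - a) + 1).toNat 0
      (PySem.List.sorted (PySem.List.slice V none (some a)) (fun x => x) false)
      _ best (le_refl 0) (by omega) ?_ ?_ rfl).symm
    · have h1 : ((0:Int) - 1).toNat = 0 := rfl
      rw [h1]
      simp only [Nat.sub_zero, List.drop_length, List.append_nil]
      rw [PySem.List.slice_to V ha0]
      exact PySem.List.sorted_perm _ _ _
    · exact PySem.List.sorted_pairwise _ _
  · rw [PySem.List.pyRange_one_eq_nil (by omega : min N (K - a) + 1 ≤ 0)]
    rfl
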